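-- pv_equiv track=rewrite | github.com/kgirtz/AdventOfCode | AoC2020/Day 6/Day 6.py | common_group_yeses
-- ===== SOURCE A (Python) =====
-- def common_group_yeses(responses: list[list[str]]) -> list[set[str]]:
--     affirmatives: list[set[str]] = []
--     for group in responses:
--         cur_set: set[str] = set(group[0])
--         for response in group[1:]:
--             cur_set &= set(response)
--         affirmatives.append(cur_set)
--     return affirmatives
-- ===== SOURCE B (Python) =====
-- def common_group_yeses(responses: list[list[str]]) -> list[set[str]]:
--     affirmatives: list[set[str]] = []
--     for group in responses:
--         counts: dict[str, int] = {}
--         for response in group: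
--             for c in set(response):
--                 counts[c] = counts.get(c, 0) + 1
--         affirmatives.append({c for c in counts if counts[c] == len(group)})
--     return affirmatives
-- ===== Notes on version B (the rewrite author's own statement) =====
-- stated objective: alternative
-- what changed: Replaces A's running pairwise set-intersection per group by a single count-then-filter pass: a frequency table over the distinct characters of each response, keeping the characters whose count equals the group size.
import Mathlib
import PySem

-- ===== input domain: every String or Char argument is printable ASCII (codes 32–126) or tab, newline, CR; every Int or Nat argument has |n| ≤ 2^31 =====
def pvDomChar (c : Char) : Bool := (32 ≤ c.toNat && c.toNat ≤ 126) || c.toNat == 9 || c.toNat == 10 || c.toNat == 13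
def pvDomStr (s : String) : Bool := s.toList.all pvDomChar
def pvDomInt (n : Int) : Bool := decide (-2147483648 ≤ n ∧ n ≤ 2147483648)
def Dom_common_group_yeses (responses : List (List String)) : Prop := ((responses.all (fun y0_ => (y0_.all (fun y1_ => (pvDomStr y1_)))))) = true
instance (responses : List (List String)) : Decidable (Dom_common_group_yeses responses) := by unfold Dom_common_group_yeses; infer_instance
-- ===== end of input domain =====

-- B replaces A's running pairwise set-intersection per group by a count-then-filter pass over a
-- frequency table of distinct characters (objective: alternative; same asymptotic cost).

-- ===== PORT A =====
-- set(r) for a string r: the distinct characters of r as one-character strings, first-occurrence order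
def pvChars (r : String) : List String :=
  PySem.Set.ofList (r.toList.map (fun c => String.ofList [c]))

def common_group_yeses (responses : List (List String)) : List (List String) :=
  responses.foldl (fun affirmatives group =>
    match group with
    | [] => affirmatives  -- unreachable under Pre_: Python raises IndexError at group[0]
    | g0 :: rest =>
      affirmatives ++ [rest.foldl (fun cur r => PySem.Set.inter cur (pvChars r)) (pvChars g0)]) []

-- ===== PORT B =====
def common_group_yeses_alt (responses : List (List String)) : List (List String) :=
  responses.foldl (fun affirmatives group =>
    let counts := group.foldl (fun d r =>
      (pvChars r).foldl (fun d c => d.insert c (d.getD c 0 + 1)) d) PySem.Dict.empty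
    affirmatives ++
      [PySem.Set.ofList (counts.keys.filter (fun c => counts.getD c 0 == (group.length : Int)))]) []

-- ===== PRECONDITION & SPEC =====
-- Pre_ excludes exactly the inputs containing an empty group, on which Python A raises IndexError.
def Pre_common_group_yeses (responses : List (List String)) : Prop :=
  ∀ g ∈ responses, g ≠ []
instance (responses : List (List String)) : Decidable (Pre_common_group_yeses responses) := by
  unfold Pre_common_group_yeses; infer_instance

def pvWitness_common_group_yeses : List (List String) := [["abc", "bcd"], ["x"]]

def Spec_common_group_yeses (responses : List (List String)) (out : List (List String)) : Prop := out = common_group_yeses_alt responses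
instance (responses : List (List String)) (out : List (List String)) : Decidable (Spec_common_group_yeses responses out) := by unfold Spec_common_group_yeses; infer_instance

-- ===== CLAIM (what is proved, stated in full; the proofs are below) =====
def Claim_equal_common_group_yeses : Prop := ∀ (responses : List (List String)), Dom_common_group_yeses responses → Pre_common_group_yeses responses → Spec_common_group_yeses responses (common_group_yeses responses)

-- ===== LEMMAS AND PROOFS =====

-- A's running intersection over a group's tail is a single filter of the starting set.
theorem foldl_inter_eq_filter (rest : List String) (s : List String) :
    rest.foldl (fun cur r => PySem.Set.inter cur (pvChars r)) s
      = s.filter (fun c => rest.all (fun r => (pvChars r).contains c)) := by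
  induction rest generalizing s with
  | nil => simp
  | cons r rest ih =>
    rw [List.foldl_cons, ih]
    simp only [PySem.Set.inter, List.filter_filter, List.all_cons]
    exact List.filter_congr (fun c _ => Bool.and_comm _ _)

-- each character occurs at most once per response, so the total count is the number of
-- responses containing it
theorem count_flatMap_pvChars (group : List String) (c : String) :
    List.count c (group.flatMap pvChars)
      = group.countP (fun r => (pvChars r).contains c) := by
  induction group with
  | nil => simp
  | cons g rest ih =>
    have hn : (pvChars g).Nodup := PySem.Set.nodup_ofList _
    have hcnt : List.count c (pvChars g) = if c ∈ pvChars g then 1 else 0 := hn.count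
    simp only [List.flatMap_cons, List.count_append, ih, List.countP_cons, hcnt]
    by_cases h : c ∈ pvChars g
    · simp [h]
      omega
    · simp [h]

-- adding further elements to a set does not change a filter whose predicate implies
-- membership in the original set
theorem filter_update_of_imp (xs : List String) (s : List String) (p : String → Bool)
    (hs : ∀ c, p c = true → c ∈ s) :
    (PySem.Set.update s xs).filter p = s.filter p := by
  induction xs generalizing s with
  | nil => rfl
  | cons x xs ih =>
    have hstep : (PySem.Set.add s x).filter p = s.filter p := by
      by_cases hc : x ∈ s
      · simp [PySem.Set.add, PySem.Set.contains, hc]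
      · have hpx : p x = false := by
          by_contra h
          exact hc (hs x (by revert h; cases p x <;> simp))
        simp [PySem.Set.add, PySem.Set.contains, hc, List.filter_append, hpx]
    have hmem : ∀ c, p c = true → c ∈ PySem.Set.add s x := by
      intro c hpc
      have := hs c hpc
      simp only [PySem.Set.add, PySem.Set.contains]
      split <;> simp [this]
    calc (PySem.Set.update s (x :: xs)).filter p
        = (PySem.Set.update (PySem.Set.add s x) xs).filter p := rfl
      _ = (PySem.Set.add s x).filter p := ih _ hmem
      _ = s.filter p := hstep

theorem ofList_append_eq_update (a b : List String) :
    PySem.Set.ofList (a ++ b) = PySem.Set.update (PySem.Set.ofList a) b := by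
  simp [PySem.Set.ofList, PySem.Set.update, List.foldl_append]

-- the two per-group computations agree on a nonempty group
theorem per_group_eq (g0 : String) (rest : List String) :
    PySem.Set.ofList
        ((((g0 :: rest).flatMap pvChars).foldl (fun d c => d.insert c (d.getD c 0 + 1))
            (PySem.Dict.empty : PySem.Dict String Int)).keys.filter (fun c =>
          (((g0 :: rest).flatMap pvChars).foldl (fun d c => d.insert c (d.getD c 0 + 1))
              (PySem.Dict.empty : PySem.Dict String Int)).getD c 0 == ((g0 :: rest).length : Int)))
      = rest.foldl (fun cur r => PySem.Set.inter cur (pvChars r)) (pvChars g0) := by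
  simp only [PySem.Dict.foldl_insert_getD_add_one_eq_counter]
  rw [foldl_inter_eq_filter]
  set L := (g0 :: rest).flatMap pvChars with hL
  set p : String → Bool :=
    fun c => (PySem.Dict.counter L).getD c 0 == ((g0 :: rest).length : Int) with hp
  -- the predicate p says "c occurs in every response of the group"
  have hpchar : ∀ c, p c = ((g0 :: rest).all (fun r => (pvChars r).contains c)) := by
    intro c
    rw [hp]
    simp only [hL, PySem.Dict.getD_counter, count_flatMap_pvChars]
    rcases Bool.eq_false_or_eq_true ((g0 :: rest).all fun r => (pvChars r).contains c) with h | h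
    · rw [h]
      have hall := List.countP_eq_length.mpr (fun a ha => List.all_eq_true.mp h a ha)
      have hall2 : List.countP (fun r => decide (c ∈ pvChars r)) (g0 :: rest)
          = (g0 :: rest).length := by
        simpa [PySem.Set.contains] using hall
      simp [hall2]
    · rw [h]
      have hlt : (g0 :: rest).countP (fun r => (pvChars r).contains c) < (g0 :: rest).length := by
        rcases Nat.lt_or_ge ((g0 :: rest).countP (fun r => (pvChars r).contains c))
            ((g0 :: rest).length) with h' | h'
        · exact h'
        · exfalso
          have hall := List.countP_eq_length.mp (Nat.le_antisymm List.countP_le_length h')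
          rw [List.all_eq_false] at h
          obtain ⟨r, hr, hrc⟩ := h
          exact hrc (hall r hr)
      simp only [beq_eq_false_iff_ne, ne_eq]
      intro hcontra
      omega
  rw [PySem.Dict.keys_counter, hL, List.flatMap_cons, ofList_append_eq_update,
    show PySem.Set.ofList (pvChars g0) = pvChars g0 from PySem.Set.ofList_ofList _]
  rw [filter_update_of_imp _ _ p
      (by
        intro c hpc
        rw [hpchar c] at hpc
        simp only [List.all_cons, Bool.and_eq_true] at hpc
        have := hpc.1
        simpa [PySem.Set.contains, List.contains_iff_mem] using this)]
  have hfil : (pvChars g0).filter p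
      = (pvChars g0).filter (fun c => rest.all (fun r => (pvChars r).contains c)) := by
    apply List.filter_congr
    intro c hc
    rw [hpchar c]
    simp only [List.all_cons]
    have : (pvChars g0).contains c = true := by
      simpa [PySem.Set.contains, List.contains_iff_mem] using hc
    rw [this, Bool.true_and]
  rw [hfil]
  exact PySem.Set.ofList_eq_self_of_nodup _ ((PySem.Set.nodup_ofList _).filter _)

-- the two folds agree step by step when every group is nonempty
theorem folds_agree (responses : List (List String)) : ∀ (acc : List (List String)),
    (∀ g ∈ responses, g ≠ []) →
    responses.foldl (fun affirmatives group =>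
      match group with
      | [] => affirmatives
      | g0 :: rest =>
        affirmatives ++ [rest.foldl (fun cur r => PySem.Set.inter cur (pvChars r)) (pvChars g0)]) acc
    = responses.foldl (fun affirmatives group =>
        let counts := group.foldl (fun d r =>
          (pvChars r).foldl (fun d c => d.insert c (d.getD c 0 + 1)) d) PySem.Dict.empty
        affirmatives ++
          [PySem.Set.ofList (counts.keys.filter (fun c => counts.getD c 0 == (group.length : Int)))]) acc := by
  induction responses with
  | nil => intro acc h; rfl
  | cons g groups ih =>
    intro acc h
    obtain ⟨g0, rest, rfl⟩ : ∃ g0 rest, g = g0 :: rest := by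
      cases g with
      | nil => exact absurd rfl (h _ (List.mem_cons_self))
      | cons a b => exact ⟨a, b, rfl⟩
    rw [List.foldl_cons, List.foldl_cons, ih _ (fun g hg => h g (List.mem_cons_of_mem _ hg))]
    congr 1
    show acc ++ [rest.foldl (fun cur r => PySem.Set.inter cur (pvChars r)) (pvChars g0)]
        = acc ++ [PySem.Set.ofList
            (((g0 :: rest).foldl (fun d r =>
                (pvChars r).foldl (fun d c => d.insert c (d.getD c 0 + 1)) d)
                (PySem.Dict.empty : PySem.Dict String Int)).keys.filter (fun c =>
              ((g0 :: rest).foldl (fun d r =>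
                  (pvChars r).foldl (fun d c => d.insert c (d.getD c 0 + 1)) d)
                  (PySem.Dict.empty : PySem.Dict String Int)).getD c 0 == ((g0 :: rest).length : Int)))]
    rw [show (g0 :: rest).foldl (fun d r =>
            (pvChars r).foldl (fun d c => d.insert c (d.getD c 0 + 1)) d)
            (PySem.Dict.empty : PySem.Dict String Int)
        = ((g0 :: rest).flatMap pvChars).foldl (fun d c => d.insert c (d.getD c 0 + 1))
            (PySem.Dict.empty : PySem.Dict String Int) from (List.foldl_flatMap).symm]
    rw [per_group_eq g0 rest]

-- ===== VERDICT (by name: the statement is the Claim_ definition above) =====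
theorem common_group_yeses_spec : Claim_equal_common_group_yeses := by
  intro responses _ hpre
  unfold Spec_common_group_yeses common_group_yeses common_group_yeses_alt
  exact folds_agree responses [] hpre
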